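-- pv_equiv track=rewrite | github.com/ViacheslavDobriy/PythonCode | Seminar2/019Task.py | modified_number
-- ===== SOURCE A (Python) =====
-- def modified_number(number):
--     list = []
--     result = 0
--     mod_number = (number + 1)**3
--     while mod_number > 0:
--         list.append(mod_number//3)
--         mod_number //= 3
--     for _ in list:
--         result += _
--     return result
-- ===== SOURCE B (Python) =====
-- def modified_number(number):
--     n = (number + 1) ** 3
--     if n <= 0:
--         return 0
--     return (n - _digitsum3(n)) // 2
--
--
-- def _digitsum3(m):
--     # base-3 digit sum, recursively
--     return 0 if m == 0 else m % 3 + _digitsum3(m // 3)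
-- ===== Notes on version B (the rewrite author's own statement) =====
-- stated objective: alternative
-- what changed: Instead of iteratively collecting the successive floor-by-three quotients into a list and summing them in a second pass, B computes the base-three digit sum of the cube by a small recursion and returns the closed form (cube minus digitsum) halved, correct by the identity: cube equals twice the quotient sum plus the digit sum.
import Mathlib
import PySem

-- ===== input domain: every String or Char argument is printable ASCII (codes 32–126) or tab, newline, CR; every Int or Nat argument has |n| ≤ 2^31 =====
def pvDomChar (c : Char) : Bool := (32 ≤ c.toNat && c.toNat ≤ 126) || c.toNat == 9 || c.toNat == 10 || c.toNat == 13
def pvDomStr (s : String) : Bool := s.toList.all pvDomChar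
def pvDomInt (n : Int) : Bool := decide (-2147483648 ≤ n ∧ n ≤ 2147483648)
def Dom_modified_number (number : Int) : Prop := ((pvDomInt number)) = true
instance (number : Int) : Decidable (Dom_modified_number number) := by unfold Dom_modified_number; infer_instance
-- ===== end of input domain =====

-- B replaces A's two passes (collect successive quotients into a list, then sum it) by a recursive
-- base-3 digit sum and the closed form (cube - digitsum) // 2; same O(log n) cost ("alternative").

-- ===== PORT A =====
-- A's while loop: append m//3, then m //= 3, until m ≤ 0; returns the list of quotients.
def pvLoopA (m : Int) : List Int :=
  if h : 0 < m then
    PySem.Int.floordiv m 3 :: pvLoopA (PySem.Int.floordiv m 3)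
  else []
termination_by m.toNat
decreasing_by
  rw [PySem.Int.floordiv_eq_ediv_of_pos (by omega : (0:Int) < 3)]
  omega

def modified_number (number : Int) : Int :=
  let mod_number := (number + 1) ^ 3
  -- the `for _ in list: result += _` summation pass
  (pvLoopA mod_number).foldl (fun result x => result + x) 0

-- ===== PORT B =====
-- B's helper `_digitsum3`, called only on nonnegative ints, so Nat `%`/`/` are exact for Python's `%`/`//`.
def pvDigitSum3 (m : Nat) : Nat :=
  if m = 0 then 0 else m % 3 + pvDigitSum3 (m / 3)
decreasing_by exact Nat.div_lt_self (by omega) (by omega)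

def modified_number_alt (number : Int) : Int :=
  let n := (number + 1) ^ 3
  if n ≤ 0 then 0
  else (n - (pvDigitSum3 n.toNat : Int)) / 2  -- Python `// 2`: divisor positive, so Int ediv is exact

-- ===== PRECONDITION & SPEC =====
def Spec_modified_number (number : Int) (out : Int) : Prop := out = modified_number_alt number
instance (number : Int) (out : Int) : Decidable (Spec_modified_number number out) := by unfold Spec_modified_number; infer_instance

-- ===== CLAIM (what is proved, stated in full; the proofs are below) =====
def Claim_equal_modified_number : Prop := ∀ (number : Int), Dom_modified_number number → Spec_modified_number number (modified_number number)

-- ===== LEMMAS AND PROOFS =====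

-- The base-3 identity linking A's quotient list to B's digit sum: 2·S + digitsum = m.
theorem pv_main : ∀ (k : Nat) (m s : Int), 0 ≤ m → m.toNat ≤ k →
    2 * ((pvLoopA m).foldl (fun a x => a + x) s) + (pvDigitSum3 m.toNat : Int) = m + 2 * s := by
  intro k
  induction k with
  | zero =>
    intro m s hm hk
    have hm0 : m = 0 := by omega
    subst hm0
    rw [pvLoopA, pvDigitSum3]
    simp
  | succ k ih =>
    intro m s hm hk
    by_cases hpos : 0 < m
    · rw [pvLoopA, dif_pos hpos]
      have hq : PySem.Int.floordiv m 3 = m / 3 :=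
        PySem.Int.floordiv_eq_ediv_of_pos (by omega)
      rw [hq]
      simp only [List.foldl_cons]
      have hq0 : 0 ≤ m / 3 := by omega
      have hqk : (m / 3).toNat ≤ k := by omega
      have hrec := ih (m / 3) (s + m / 3) hq0 hqk
      rw [pvDigitSum3, if_neg (by omega : ¬ m.toNat = 0)]
      have hdiv : m.toNat / 3 = (m / 3).toNat := by omega
      have hmod : (m.toNat % 3 : Int) = m % 3 := by omega
      push_cast
      rw [hdiv, hmod]
      omega
    · have hm0 : m = 0 := by omega
      subst hm0
      rw [pvLoopA, pvDigitSum3]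
      simp

-- ===== VERDICT (by name: the statement is the Claim_ definition above) =====
theorem modified_number_spec : Claim_equal_modified_number := by
  intro number _
  unfold Spec_modified_number modified_number modified_number_alt
  dsimp only
  set n := (number + 1) ^ 3 with hn
  by_cases hle : n ≤ 0
  · rw [if_pos hle, pvLoopA]
    simp [not_lt.mpr hle]
  · rw [not_le] at hle
    rw [if_neg (by omega)]
    have h := pv_main n.toNat n 0 (by omega) (le_refl _)
    have hds : (0:Int) ≤ (pvDigitSum3 n.toNat : Int) := by positivity
    omega
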